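-- pv_equiv track=rewrite | github.com/SaaidiaFarouk/Finding-Hidden-Messages-in-DNA-Bioinformatics-I- | week 1 2 3/motif_enumeration.py | MotifEnumeration
-- ===== SOURCE A (Python) =====
-- def suffix (pattern):
--     patternn =pattern[1:len(pattern)]
--     return patternn
--
-- def hamming_distance(p,q):
--     c=0
--     for i in range(len(p)):
--         if p[i]!=q[i]:
--             c+=1
--     return c
--
-- def Neighbors(Pattern, d):
--     Neighborhood=list()
--     if d==0:
--         Neighborhood.append(Pattern)
--         return Neighborhood
--     if len(Pattern)==1 :
--         return ['A','C','T','G']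
--     Neighborhood=list()
--     SuffixNeighbors=Neighbors(suffix(Pattern), d)
--     for text in SuffixNeighbors:
--         if hamming_distance(suffix(Pattern), text) < d:
--             for x in ['A','C','T','G']:
--                 Neighborhood.append(x+text)
--         else:
--             Neighborhood.append(Pattern[0]+text)
--     return Neighborhood
--
-- def MotifEnumeration(Dna, k, d):
--     Patterns=list()
--     seqlist=Dna.split( )
--     frst=seqlist[0]
--     neighborhood=list()
--     for i in range(len(frst)-k+1):
--         pattern=frst[i:i+k]
--         neighborhood=Neighbors(pattern,d)
--         for neighbor in neighborhood :
--             c=0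
--             for seq in seqlist:
--                 neighborhoood=list()
--                 for f in range(len(seq)-k+1):
--                     diff=seq[f:f+k]
--                     neighboorhood=Neighbors(diff,d)
--                     for g in range(len(neighboorhood)):
--                         neighborhoood.append(neighboorhood[g])
--                 if neighbor in neighborhoood :
--                     c+=1
--             if c==len(seqlist):
--                 Patterns.append(neighbor)
--     Patterns.sort()
--     patterns=list()
--     for i in range(len(Patterns)):
--         if Patterns[i] not in patterns :
--             patterns.append(Patterns[i])
--     return patterns
-- ===== SOURCE B (Python) =====
-- def MotifEnumeration(Dna, k, d):
--     # Precompute each sequence's (k,d)-neighborhood set once; answer = sorted intersection.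
--     seqs = Dna.split()
--
--     def kmer_neighbors(p):
--         if d == 0:
--             return {p}
--         # pairs of (neighbor-of-suffix, hamming distance to that suffix), built right-to-left
--         pairs = {(x, 0 if x == p[-1] else 1) for x in 'ACTG'}
--         for c in reversed(p[:-1]):
--             nxt = set()
--             for t, h in pairs:
--                 if h < d:
--                     for x in 'ACTG':
--                         nxt.add((x + t, h + (0 if x == c else 1)))
--                 else:
--                     nxt.add((c + t, h))
--             pairs = nxt
--         return {t for t, _ in pairs}
--
--     def neighborhood(s):
--         out = set()
--         for i in range(len(s) - k + 1):
--             out |= kmer_neighbors(s[i:i+k])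
--         return out
--
--     common = neighborhood(seqs[0])
--     for s in seqs[1:]:
--         common &= neighborhood(s)
--     return sorted(common)
-- ===== Notes on version B (the rewrite author's own statement) =====
-- stated objective: faster
-- what changed: B computes each sequence's whole (k,d)-neighborhood set once (generating neighbors right-to-left while tracking their Hamming distance) and returns the sorted intersection of those sets, instead of A's per-candidate rescan that regenerates every sequence's full neighborhood for every single candidate neighbor; intended as faster - a timing run measured a several-hundred-fold speed-up at the largest size both finished (unconfirmed beyond that: for large d the 4^d-sized neighborhoods make both programs blow up).
import Mathlib
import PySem

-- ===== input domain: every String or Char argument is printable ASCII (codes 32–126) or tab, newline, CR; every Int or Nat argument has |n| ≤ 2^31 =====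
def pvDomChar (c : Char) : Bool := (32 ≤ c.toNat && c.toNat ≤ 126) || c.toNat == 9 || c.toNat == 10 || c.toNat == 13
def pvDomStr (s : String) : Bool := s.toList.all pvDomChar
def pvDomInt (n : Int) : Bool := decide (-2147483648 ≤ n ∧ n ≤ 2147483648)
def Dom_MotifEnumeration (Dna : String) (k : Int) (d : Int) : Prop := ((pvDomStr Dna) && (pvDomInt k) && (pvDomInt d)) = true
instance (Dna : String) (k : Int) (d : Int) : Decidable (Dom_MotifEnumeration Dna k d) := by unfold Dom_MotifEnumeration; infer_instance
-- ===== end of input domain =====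

-- B precomputes each sequence's whole (k,d)-neighborhood set ONCE (generating neighbors
-- right-to-left while tracking their Hamming distance) and intersects those sets, instead
-- of A's per-candidate rescan that regenerates every sequence's full neighborhood for
-- every candidate; intended as faster (a timing run measured a several-hundred-fold
-- speed-up at the largest size on which both finished; unconfirmed beyond that, where
-- the 4^d-sized neighborhoods make both programs blow up).

-- ===== PORT A =====
def pyACTG : List Char := ['A', 'C', 'T', 'G']

-- hamming_distance(p, q): p[i]/q[i] through pyGetD — exact at every call site of A,
-- where both strings always have equal length (no IndexError is reachable).
def hammingA (p q : List Char) : Int :=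
  (PySem.List.pyRange 0 (p.length : Int) 1).foldl
    (fun c i => if PySem.List.pyGetD p i ' ' ≠ PySem.List.pyGetD q i ' ' then c + 1 else c) 0

-- Neighbors(Pattern, d).  suffix(Pattern) of c :: rest is rest (pattern[1:]).
-- On the empty pattern with d ≠ 0 Python recurses forever (RecursionError);
-- that input is unreachable under Pre_, the [] => [] arm only makes the port total.
def NeighborsA (P : List Char) (d : Int) : List (List Char) :=
  if d = 0 then [P]
  else
    match P with
    | [] => []
    | [_] => [['A'], ['C'], ['T'], ['G']]
    | c :: rest =>
      (NeighborsA rest d).foldl (fun acc text =>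
        if hammingA rest text < d then acc ++ pyACTG.map (fun x => x :: text)
        else acc ++ [c :: text]) []

-- the 'for f in range(...)' loop building neighborhoood for one seq
-- (the innermost g-loop appends neighboorhood[g] one by one, i.e. acc ++ Neighbors(diff, d))
def bigA (k d : Int) (seq : List Char) : List (List Char) :=
  (PySem.List.pyRange 0 ((seq.length : Int) - k + 1) 1).foldl
    (fun acc f => acc ++ NeighborsA (PySem.List.slice seq (some f) (some (f + k))) d) []

def MotifEnumeration (Dna : String) (k : Int) (d : Int) : List String :=
  match PySem.Str.split₀ Dna with
  | [] => []     -- Python raises IndexError (seqlist[0]) when Dna has no words; excluded by Pre_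
  | frst :: restWords =>
    let seqlist : List (List Char) := ((frst :: restWords).map String.toList)
    let F := frst.toList
    let Patterns : List (List Char) :=
      (PySem.List.pyRange 0 ((F.length : Int) - k + 1) 1).foldl (fun Ps i =>
        (NeighborsA (PySem.List.slice F (some i) (some (i + k))) d).foldl (fun Ps neighbor =>
          let c : Int := seqlist.foldl (fun c seq =>
            if neighbor ∈ bigA k d seq then c + 1 else c) 0
          if c = (seqlist.length : Int) then Ps ++ [neighbor] else Ps) Ps) []
    let sortedP := PySem.List.sorted (Patterns.map (fun l => String.ofList l)) (fun x => x) false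
    sortedP.foldl (fun ps x => if ps.contains x then ps else ps ++ [x]) []

-- ===== PORT B =====
-- {(x, 0 if x == p[-1] else 1) for x in 'ACTG'}
def baseB (p : List Char) : PySem.Set (List Char × Int) :=
  PySem.Set.ofList (pyACTG.map (fun x => ([x], if x = PySem.List.pyGetD p (-1) ' ' then 0 else 1)))

-- one iteration of the 'for c in reversed(p[:-1])' loop of kmer_neighbors
def stepB (d : Int) (pairs : PySem.Set (List Char × Int)) (c : Char) : PySem.Set (List Char × Int) :=
  pairs.foldl (fun nxt th =>
    if th.2 < d then
      pyACTG.foldl (fun o x => PySem.Set.add o (x :: th.1, th.2 + (if x = c then 0 else 1))) nxt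
    else PySem.Set.add nxt (c :: th.1, th.2)) PySem.Set.empty

def kmerNbrsB (d : Int) (p : List Char) : PySem.Set (List Char) :=
  if d = 0 then PySem.Set.ofList [p]
  else
    let pairs := ((PySem.List.slice p none (some (-1))).reverse).foldl (stepB d) (baseB p)
    PySem.Set.ofList (pairs.map Prod.fst)

def nbhdB (k d : Int) (s : List Char) : PySem.Set (List Char) :=
  (PySem.List.pyRange 0 ((s.length : Int) - k + 1) 1).foldl
    (fun out i => PySem.Set.union out (kmerNbrsB d (PySem.List.slice s (some i) (some (i + k)))))
    PySem.Set.empty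

def MotifEnumeration_alt (Dna : String) (k : Int) (d : Int) : List String :=
  match PySem.Str.split₀ Dna with
  | [] => []     -- Python raises IndexError (seqs[0]); excluded by Pre_
  | s0 :: rest =>
    let common := (rest.map String.toList).foldl
      (fun common s => PySem.Set.inter common (nbhdB k d s)) (nbhdB k d s0.toList)
    PySem.List.sorted (common.map (fun l => String.ofList l)) (fun x => x) false

-- ===== PRECONDITION & SPEC =====
-- Pre_ excludes exactly the inputs on which A raises: Dna without words (IndexError on
-- seqlist[0]) and d ≠ 0 with k ≤ 0 (some slice is the empty string, on which Neighbors
-- recurses forever: RecursionError).  A returns on every input satisfying Pre_.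
def Pre_MotifEnumeration (Dna : String) (k : Int) (d : Int) : Prop :=
  PySem.Str.split₀ Dna ≠ [] ∧ (d = 0 ∨ 1 ≤ k)
instance (Dna : String) (k : Int) (d : Int) : Decidable (Pre_MotifEnumeration Dna k d) := by
  unfold Pre_MotifEnumeration; infer_instance

def pvWitness_MotifEnumeration : String × Int × Int := ("ATTTGGC TGCCTTA CGGTATC", 3, 1)

def Spec_MotifEnumeration (Dna : String) (k : Int) (d : Int) (out : List String) : Prop := out = MotifEnumeration_alt Dna k d
instance (Dna : String) (k : Int) (d : Int) (out : List String) : Decidable (Spec_MotifEnumeration Dna k d out) := by unfold Spec_MotifEnumeration; infer_instance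

-- ===== CLAIM (what is proved, stated in full; the proofs are below) =====
def Claim_equal_MotifEnumeration : Prop := ∀ (Dna : String) (k : Int) (d : Int), Dom_MotifEnumeration Dna k d → Pre_MotifEnumeration Dna k d → Spec_MotifEnumeration Dna k d (MotifEnumeration Dna k d)

-- ===== LEMMAS AND PROOFS =====

-- recursive Hamming distance, for reasoning only
def hamR : List Char → List Char → Int
  | a :: p, b :: q => (if a = b then 0 else 1) + hamR p q
  | _, _ => 0

theorem hammingA_countP (p q : List Char) :
    hammingA p q = ((List.range p.length).countP
      (fun i => decide (p.getD i ' ' ≠ q.getD i ' ')) : Int) := by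
  unfold hammingA
  rw [PySem.List.pyRange_zero_natCast, List.foldl_map]
  have := PySem.List.foldl_count_if (fun (i : Nat) => decide (p.getD i ' ' ≠ q.getD i ' ')) (List.range p.length) 0
  rw [zero_add] at this
  rw [← this]
  apply PySem.List.foldl_congr_mem
  intro c i _
  simp [PySem.List.pyGetD_natCast]

theorem hammingA_eq_hamR (p q : List Char) (h : q.length = p.length) :
    hammingA p q = hamR p q := by
  induction p generalizing q with
  | nil => simp [hammingA_countP, hamR]
  | cons a p ih =>
    cases q with
    | nil => simp at h
    | cons b q =>
      simp only [List.length_cons, Nat.add_right_cancel_iff] at h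
      rw [hammingA_countP, List.length_cons, List.range_succ_eq_map, List.countP_cons,
        List.countP_map, hamR]
      have ih' := ih q h
      rw [hammingA_countP] at ih'
      have e1 : ((fun i => decide (List.getD (a :: p) i ' ' ≠ List.getD (b :: q) i ' ')) ∘ Nat.succ)
          = fun i => decide (p.getD i ' ' ≠ q.getD i ' ') := by
        funext i; simp
      rw [e1, ← ih']
      by_cases hab : a = b
      · simp [hab, List.getD]
      · simp [hab, List.getD]
        ring

theorem NeighborsA_zero (p : List Char) : NeighborsA p 0 = [p] := by
  rw [NeighborsA.eq_def]
  simp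

theorem NeighborsA_single {d : Int} (hd : d ≠ 0) (c : Char) :
    NeighborsA [c] d = [['A'], ['C'], ['T'], ['G']] := by
  rw [NeighborsA, if_neg hd]

theorem NeighborsA_cons_eq {d : Int} (hd : d ≠ 0) (c r : Char) (rs : List Char) :
    NeighborsA (c :: r :: rs) d = (NeighborsA (r :: rs) d).flatMap
      (fun text => if hammingA (r :: rs) text < d then pyACTG.map (fun x => x :: text)
        else [c :: text]) := by
  rw [NeighborsA]
  rw [if_neg hd]
  have h1 := PySem.List.foldl_congr_mem
    (f := fun acc text => if hammingA (r :: rs) text < d then acc ++ pyACTG.map (fun x => x :: text)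
      else acc ++ [c :: text])
    (g := fun acc text => acc ++
      (if hammingA (r :: rs) text < d then pyACTG.map (fun x => x :: text) else [c :: text]))
    (l := NeighborsA (r :: rs) d) (init := [])
    (by intro acc text _; simp only []; split <;> rfl)
  rw [h1, PySem.List.foldl_append_eq_flatMap, List.nil_append]
  simp

theorem mem_NeighborsA_length {d : Int} (hd : d ≠ 0) :
    ∀ (p : List Char), ∀ t ∈ NeighborsA p d, t.length = p.length := by
  intro p
  induction p with
  | nil => intro t ht; rw [NeighborsA, if_neg hd] at ht; simp at ht
  | cons c rest ih =>
    cases rest with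
    | nil =>
      intro t ht; rw [NeighborsA, if_neg hd] at ht
      simp only [List.mem_cons] at ht
      rcases ht with h|h|h|h|h <;> simp_all
    | cons r rs =>
      intro t ht
      rw [NeighborsA_cons_eq hd, List.mem_flatMap] at ht
      obtain ⟨text, htext, hmem⟩ := ht
      have hl := ih text htext
      split at hmem
      · simp only [List.mem_map] at hmem
        obtain ⟨x, -, rfl⟩ := hmem; simp [hl]
      · simp only [List.mem_singleton] at hmem; subst hmem; simp [hl]

theorem mem_NeighborsA_cons {d : Int} (hd : d ≠ 0) (c : Char) (r : Char) (rs : List Char)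
    (t' : List Char) :
    t' ∈ NeighborsA (c :: r :: rs) d ↔
      ∃ t ∈ NeighborsA (r :: rs) d,
        (hamR (r :: rs) t < d ∧ ∃ x ∈ pyACTG, t' = x :: t) ∨ (¬ hamR (r :: rs) t < d ∧ t' = c :: t) := by
  rw [NeighborsA_cons_eq hd, List.mem_flatMap]
  constructor
  · rintro ⟨t, ht, hmem⟩
    refine ⟨t, ht, ?_⟩
    rw [hammingA_eq_hamR _ _ (mem_NeighborsA_length hd _ t ht)] at hmem
    split at hmem
    · exact Or.inl ⟨by assumption, by simpa [eq_comm] using hmem⟩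
    · exact Or.inr ⟨by assumption, by simpa using hmem⟩
  · rintro ⟨t, ht, h⟩
    refine ⟨t, ht, ?_⟩
    rw [hammingA_eq_hamR _ _ (mem_NeighborsA_length hd _ t ht)]
    rcases h with ⟨hlt, x, hx, rfl⟩ | ⟨hge, rfl⟩
    · rw [if_pos hlt]; exact List.mem_map.2 ⟨x, hx, rfl⟩
    · rw [if_neg hge]; simp

theorem mem_actg_foldl_add {α : Type} [BEq α] [LawfulBEq α] (g : Char → α) (o : PySem.Set α) (y : α) :
    y ∈ pyACTG.foldl (fun o x => PySem.Set.add o (g x)) o ↔ y ∈ o ∨ ∃ x ∈ pyACTG, y = g x := by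
  simp only [pyACTG, List.foldl, List.mem_cons, List.not_mem_nil, PySem.Set.mem_add]
  constructor
  · rintro ((((h | h) | h) | h) | h)
    · exact Or.inl h
    all_goals exact Or.inr ⟨_, by simp, h⟩
  · rintro (h | ⟨x, hx, rfl⟩)
    · exact Or.inl (Or.inl (Or.inl (Or.inl h)))
    · rcases hx with rfl | rfl | rfl | rfl | h
      · exact Or.inl (Or.inl (Or.inl (Or.inr rfl)))
      · exact Or.inl (Or.inl (Or.inr rfl))
      · exact Or.inl (Or.inr rfl)
      · exact Or.inr rfl
      · exact absurd h (by simp)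

theorem mem_stepB_aux {d : Int} (c : Char) (S : List (List Char × Int))
    (acc : PySem.Set (List Char × Int)) (y : List Char × Int) :
    y ∈ S.foldl (fun nxt th =>
      if th.2 < d then
        pyACTG.foldl (fun o x => PySem.Set.add o (x :: th.1, th.2 + (if x = c then 0 else 1))) nxt
      else PySem.Set.add nxt (c :: th.1, th.2)) acc ↔
      y ∈ acc ∨ ∃ th ∈ S, (th.2 < d ∧ ∃ x ∈ pyACTG, y = (x :: th.1, th.2 + (if x = c then 0 else 1)))
        ∨ (¬ th.2 < d ∧ y = (c :: th.1, th.2)) := by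
  induction S generalizing acc with
  | nil => simp
  | cons th S ih =>
    rw [List.foldl_cons, ih]
    by_cases h : th.2 < d
    · rw [if_pos h, mem_actg_foldl_add]
      simp only [List.mem_cons]
      constructor
      · rintro (((hy | ⟨x, hx, rfl⟩) | ⟨th', hth', hc⟩))
        · exact Or.inl hy
        · exact Or.inr ⟨th, Or.inl rfl, Or.inl ⟨h, x, hx, rfl⟩⟩
        · exact Or.inr ⟨th', Or.inr hth', hc⟩
      · rintro (hy | ⟨th', (rfl | hth'), hc⟩)
        · exact Or.inl (Or.inl hy)
        · rcases hc with ⟨-, x, hx, rfl⟩ | ⟨hnd, -⟩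
          · exact Or.inl (Or.inr ⟨x, hx, rfl⟩)
          · exact absurd h hnd
        · exact Or.inr ⟨th', hth', hc⟩
    · rw [if_neg h]
      simp only [PySem.Set.mem_add, List.mem_cons]
      constructor
      · rintro ((hy | rfl) | ⟨th', hth', hc⟩)
        · exact Or.inl hy
        · exact Or.inr ⟨th, Or.inl rfl, Or.inr ⟨h, rfl⟩⟩
        · exact Or.inr ⟨th', Or.inr hth', hc⟩
      · rintro (hy | ⟨th', (rfl | hth'), hc⟩)
        · exact Or.inl (Or.inl hy)
        · rcases hc with ⟨hd', -⟩ | ⟨-, rfl⟩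
          · exact absurd hd' h
          · exact Or.inl (Or.inr rfl)
        · exact Or.inr ⟨th', hth', hc⟩

theorem mem_stepB {d : Int} (S : PySem.Set (List Char × Int)) (c : Char) (y : List Char × Int) :
    y ∈ stepB d S c ↔
      ∃ th ∈ S, (th.2 < d ∧ ∃ x ∈ pyACTG, y = (x :: th.1, th.2 + (if x = c then 0 else 1)))
        ∨ (¬ th.2 < d ∧ y = (c :: th.1, th.2)) := by
  unfold stepB
  rw [mem_stepB_aux]
  simp [PySem.Set.empty]

theorem ite_char_comm (a b : Char) : (if a = b then (0:Int) else 1) = (if b = a then 0 else 1) := by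
  by_cases h : a = b
  · simp [h]
  · rw [if_neg h, if_neg (Ne.symm h)]

theorem hamR_single (c x : Char) : hamR [c] [x] = if c = x then 0 else 1 := by
  simp [hamR]

theorem baseB_cons (c : Char) (rest : List Char) (hr : rest ≠ []) :
    baseB (c :: rest) = baseB rest := by
  unfold baseB
  rw [PySem.List.pyGetD_neg_one _ _ (List.cons_ne_nil c rest), PySem.List.pyGetD_neg_one _ _ hr,
    List.getLast_cons hr]

theorem mem_baseB {d : Int} (hd : d ≠ 0) (c : Char) (t : List Char) (h : Int) :
    (t, h) ∈ baseB [c] ↔ t ∈ NeighborsA [c] d ∧ h = hamR [c] t := by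
  unfold baseB
  rw [PySem.Set.mem_ofList, NeighborsA_single hd]
  rw [PySem.List.pyGetD_neg_one _ _ (by simp)]
  simp only [List.mem_map, List.getLast_singleton]
  constructor
  · rintro ⟨x, hx, he⟩
    obtain ⟨rfl, rfl⟩ := Prod.mk.injEq .. ▸ he.symm
    refine ⟨?_, by rw [hamR_single, ← ite_char_comm]; try rfl⟩
    simp only [pyACTG, List.mem_cons, List.not_mem_nil, or_false] at hx
    rcases hx with rfl | rfl | rfl | rfl <;> simp
  · rintro ⟨ht, rfl⟩
    simp only [List.mem_cons, List.not_mem_nil, or_false] at ht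
    rcases ht with rfl | rfl | rfl | rfl
    · exact ⟨'A', by simp [pyACTG], by rw [hamR_single, ← ite_char_comm]; try rfl⟩
    · exact ⟨'C', by simp [pyACTG], by rw [hamR_single, ← ite_char_comm]; try rfl⟩
    · exact ⟨'T', by simp [pyACTG], by rw [hamR_single, ← ite_char_comm]; try rfl⟩
    · exact ⟨'G', by simp [pyACTG], by rw [hamR_single, ← ite_char_comm]; try rfl⟩

theorem pairs_spec {d : Int} (hd : d ≠ 0) :
    ∀ (p : List Char), p ≠ [] → ∀ t h,
      ((t, h) ∈ (((PySem.List.slice p none (some (-1))).reverse).foldl (stepB d) (baseB p)) ↔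
        t ∈ NeighborsA p d ∧ h = hamR p t) := by
  intro p
  induction p with
  | nil => intro h; exact absurd rfl h
  | cons c rest ih =>
    intro _ t h
    cases rest with
    | nil =>
      rw [PySem.List.slice_to_neg_one]
      simp only [List.dropLast, List.reverse_nil, List.foldl_nil]
      exact mem_baseB hd c t h
    | cons r rs =>
      have hr : (r :: rs) ≠ [] := List.cons_ne_nil r rs
      rw [PySem.List.slice_to_neg_one] at *
      rw [List.dropLast_cons₂, List.reverse_cons, List.foldl_append, List.foldl_cons,
        List.foldl_nil, baseB_cons c _ hr, mem_stepB, mem_NeighborsA_cons hd]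
      constructor
      · rintro ⟨th, hth, hcase⟩
        obtain ⟨h1, h2⟩ := (ih hr th.1 th.2).1 (by simpa using hth)
        rcases hcase with ⟨hlt, x, hx, he⟩ | ⟨hge, he⟩
        · obtain ⟨rfl, rfl⟩ := Prod.mk.injEq .. ▸ he
          refine ⟨⟨th.1, h1, Or.inl ⟨h2 ▸ hlt, x, hx, rfl⟩⟩, ?_⟩
          rw [hamR, h2]
          by_cases hxc : x = c
          · simp [hxc]
          · rw [if_neg hxc, if_neg (Ne.symm hxc)]; omega
        · obtain ⟨rfl, rfl⟩ := Prod.mk.injEq .. ▸ he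
          refine ⟨⟨th.1, h1, Or.inr ⟨h2 ▸ hge, rfl⟩⟩, ?_⟩
          rw [hamR, h2]; simp
      · rintro ⟨⟨t0, ht0, hcase⟩, rfl⟩
        rcases hcase with ⟨hlt, x, hx, rfl⟩ | ⟨hge, rfl⟩
        · refine ⟨(t0, hamR (r :: rs) t0), (ih hr t0 _).2 ⟨ht0, rfl⟩, Or.inl ⟨hlt, x, hx, ?_⟩⟩
          rw [hamR]
          by_cases hxc : x = c
          · simp [hxc]
          · rw [if_neg hxc, if_neg (Ne.symm hxc)]
            simp only [Prod.mk.injEq, true_and]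
            omega
        · refine ⟨(t0, hamR (r :: rs) t0), (ih hr t0 _).2 ⟨ht0, rfl⟩, Or.inr ⟨hge, ?_⟩⟩
          rw [hamR]; simp

theorem mem_kmerNbrsB {d : Int} (p : List Char) (hp : p ≠ [] ∨ d = 0) (x : List Char) :
    x ∈ kmerNbrsB d p ↔ x ∈ NeighborsA p d := by
  by_cases hd : d = 0
  · subst hd
    rw [NeighborsA_zero]
    simp [kmerNbrsB, PySem.Set.mem_ofList]
  · have hpne : p ≠ [] := hp.resolve_right hd
    unfold kmerNbrsB
    rw [if_neg hd, PySem.Set.mem_ofList, List.mem_map]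
    constructor
    · rintro ⟨th, hth, rfl⟩
      exact ((pairs_spec hd p hpne th.1 th.2).1 (by simpa using hth)).1
    · intro hx
      exact ⟨(x, hamR p x), (pairs_spec hd p hpne x _).2 ⟨hx, rfl⟩, rfl⟩

theorem mem_foldl_union {α : Type} [BEq α] [LawfulBEq α] (g : Int → PySem.Set α)
    (l : List Int) (acc : PySem.Set α) (x : α) :
    x ∈ l.foldl (fun out i => PySem.Set.union out (g i)) acc ↔ x ∈ acc ∨ ∃ i ∈ l, x ∈ g i := by
  induction l generalizing acc with
  | nil => simp
  | cons i l ih =>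
    rw [List.foldl_cons, ih]
    simp only [PySem.Set.mem_union, List.mem_cons]
    constructor
    · rintro ((h | h) | ⟨j, hj, hx⟩)
      · exact Or.inl h
      · exact Or.inr ⟨i, Or.inl rfl, h⟩
      · exact Or.inr ⟨j, Or.inr hj, hx⟩
    · rintro (h | ⟨j, (rfl | hj), hx⟩)
      · exact Or.inl (Or.inl h)
      · exact Or.inl (Or.inr hx)
      · exact Or.inr ⟨j, hj, hx⟩

theorem nodup_foldl_union {α : Type} [BEq α] [LawfulBEq α] (g : Int → PySem.Set α)
    (l : List Int) (acc : PySem.Set α) (h : acc.Nodup) :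
    (l.foldl (fun out i => PySem.Set.union out (g i)) acc).Nodup := by
  induction l generalizing acc with
  | nil => exact h
  | cons i l ih => exact ih _ (PySem.Set.nodup_union _ _ h)

theorem mem_nbhdB (k d : Int) (s : List Char) (x : List Char) :
    x ∈ nbhdB k d s ↔
      ∃ i ∈ PySem.List.pyRange 0 ((s.length : Int) - k + 1) 1,
        x ∈ kmerNbrsB d (PySem.List.slice s (some i) (some (i + k))) := by
  unfold nbhdB
  rw [mem_foldl_union]
  simp [PySem.Set.empty]

theorem nodup_nbhdB (k d : Int) (s : List Char) : (nbhdB k d s).Nodup := by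
  unfold nbhdB
  exact nodup_foldl_union _ _ _ (by simp [PySem.Set.empty])

theorem mem_foldl_inter {α : Type} [BEq α] [LawfulBEq α] (g : List Char → PySem.Set α)
    (l : List (List Char)) (acc : PySem.Set α) (x : α) :
    x ∈ l.foldl (fun c s => PySem.Set.inter c (g s)) acc ↔ x ∈ acc ∧ ∀ s ∈ l, x ∈ g s := by
  induction l generalizing acc with
  | nil => simp
  | cons s l ih =>
    rw [List.foldl_cons, ih]
    simp only [PySem.Set.mem_inter, List.mem_cons]
    constructor
    · rintro ⟨⟨h1, h2⟩, h3⟩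
      exact ⟨h1, fun s' hs' => hs'.elim (fun he => he ▸ h2) (h3 s')⟩
    · rintro ⟨h1, h2⟩
      exact ⟨⟨h1, h2 s (Or.inl rfl)⟩, fun s' hs' => h2 s' (Or.inr hs')⟩

theorem nodup_foldl_inter {α : Type} [BEq α] (g : List Char → PySem.Set α)
    (l : List (List Char)) (acc : PySem.Set α) (h : acc.Nodup) :
    (l.foldl (fun c s => PySem.Set.inter c (g s)) acc).Nodup := by
  induction l generalizing acc with
  | nil => exact h
  | cons s l ih => exact ih _ (PySem.Set.nodup_inter _ _ h)

-- A's dedup loop is exactly set(…) insertion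
theorem foldl_add_sublist {α : Type} [BEq α] (xs : List α) :
    ∀ acc : PySem.Set α, ∃ ys, List.Sublist ys xs ∧ xs.foldl PySem.Set.add acc = acc ++ ys := by
  induction xs with
  | nil => intro acc; exact ⟨[], List.Sublist.refl _, by simp⟩
  | cons x xs ih =>
    intro acc
    rw [List.foldl_cons]
    by_cases h : PySem.Set.contains acc x
    · rw [show acc.add x = acc by unfold PySem.Set.add; rw [if_pos h]]
      obtain ⟨ys, hsub, he⟩ := ih acc
      exact ⟨ys, hsub.cons x, he⟩
    · rw [show acc.add x = acc ++ [x] by unfold PySem.Set.add; rw [if_neg h]]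
      obtain ⟨ys, hsub, he⟩ := ih (acc ++ [x])
      exact ⟨x :: ys, hsub.cons₂ x, by rw [he, List.append_assoc]; rfl⟩

theorem ofList_sublist' {α : Type} [BEq α] (xs : List α) :
    List.Sublist (PySem.Set.ofList xs) xs := by
  obtain ⟨ys, hsub, he⟩ := foldl_add_sublist xs ([] : PySem.Set α)
  rw [PySem.Set.ofList_eq_foldl, he]
  simpa using hsub

theorem slice_cons_ne_nil {s : List Char} {k i : Int} (hk : 1 ≤ k)
    (hi : i ∈ PySem.List.pyRange 0 ((s.length : Int) - k + 1) 1) :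
    PySem.List.slice s (some i) (some (i + k)) ≠ [] := by
  rw [PySem.List.mem_pyRange_one] at hi
  obtain ⟨h0, h1⟩ := hi
  have hlen : (PySem.List.slice s (some i) (some (i + k))).length = k.toNat := by
    rw [PySem.List.slice_toNat (a := i) (b := i + k) (ha := h0) (hb := by omega)]
    simp only [List.length_take, List.length_drop]
    omega
  intro hnil
  rw [hnil] at hlen
  simp at hlen
  omega

theorem mem_bigA (k d : Int) (seq : List Char) (x : List Char) :
    x ∈ bigA k d seq ↔
      ∃ i ∈ PySem.List.pyRange 0 ((seq.length : Int) - k + 1) 1,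
        x ∈ NeighborsA (PySem.List.slice seq (some i) (some (i + k))) d := by
  unfold bigA
  rw [PySem.List.foldl_append_eq_flatMap, List.nil_append, List.mem_flatMap]

theorem bigA_iff_nbhdB (k d : Int) (hkd : d = 0 ∨ 1 ≤ k) (seq : List Char) (x : List Char) :
    x ∈ bigA k d seq ↔ x ∈ nbhdB k d seq := by
  rw [mem_bigA, mem_nbhdB]
  refine exists_congr fun i => and_congr_right fun hi => ?_
  rcases hkd with rfl | hk
  · exact (mem_kmerNbrsB _ (Or.inr rfl) x).symm
  · exact (mem_kmerNbrsB _ (Or.inl (slice_cons_ne_nil hk hi)) x).symm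

theorem mem_PatternsA (k d : Int) (F : List Char) (seqlist : List (List Char)) (x : List Char) :
    x ∈ (PySem.List.pyRange 0 ((F.length : Int) - k + 1) 1).foldl (fun Ps i =>
        (NeighborsA (PySem.List.slice F (some i) (some (i + k))) d).foldl (fun Ps neighbor =>
          if (seqlist.foldl (fun c seq =>
              if neighbor ∈ bigA k d seq then c + 1 else c) 0) = (seqlist.length : Int)
          then Ps ++ [neighbor] else Ps) Ps) []
      ↔ (∃ i ∈ PySem.List.pyRange 0 ((F.length : Int) - k + 1) 1,
          x ∈ NeighborsA (PySem.List.slice F (some i) (some (i + k))) d)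
        ∧ ∀ seq ∈ seqlist, x ∈ bigA k d seq := by
  have hc : ∀ n : List Char,
      (seqlist.foldl (fun c seq => if n ∈ bigA k d seq then c + 1 else c) 0)
        = ((seqlist.countP (fun seq => decide (n ∈ bigA k d seq))) : Int) := by
    intro n
    have h := PySem.List.foldl_count_if (fun seq => decide (n ∈ bigA k d seq)) seqlist 0
    rw [zero_add] at h
    rw [← h]
    apply PySem.List.foldl_congr_mem
    intro c seq _
    simp
  have hinner : ∀ (Ps nb : List (List Char)),
      nb.foldl (fun Ps neighbor =>
        if (seqlist.foldl (fun c seq =>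
            if neighbor ∈ bigA k d seq then c + 1 else c) 0) = (seqlist.length : Int)
        then Ps ++ [neighbor] else Ps) Ps
      = Ps ++ nb.filter (fun n =>
          decide (((seqlist.countP (fun seq => decide (n ∈ bigA k d seq))) : Int) = (seqlist.length : Int))) := by
    intro Ps nb
    have h1 := PySem.List.foldl_congr_mem
      (f := fun Ps neighbor =>
        if (seqlist.foldl (fun c seq =>
            if neighbor ∈ bigA k d seq then c + 1 else c) 0) = (seqlist.length : Int)
        then Ps ++ [neighbor] else Ps)
      (g := fun Ps neighbor =>
        if (((seqlist.countP (fun seq => decide (neighbor ∈ bigA k d seq))) : Int) = (seqlist.length : Int))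
        then Ps ++ [neighbor] else Ps)
      (l := nb) (init := Ps)
      (by intro acc n _; simp only []; rw [hc n])
    rw [h1]
    exact PySem.List.foldl_append_ite_eq_filter _ _ _
  have h2 := PySem.List.foldl_congr_mem
    (f := fun Ps i =>
      (NeighborsA (PySem.List.slice F (some i) (some (i + k))) d).foldl (fun Ps neighbor =>
        if (seqlist.foldl (fun c seq =>
            if neighbor ∈ bigA k d seq then c + 1 else c) 0) = (seqlist.length : Int)
        then Ps ++ [neighbor] else Ps) Ps)
    (g := fun Ps i => Ps ++ (NeighborsA (PySem.List.slice F (some i) (some (i + k))) d).filter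
      (fun n => decide (((seqlist.countP (fun seq => decide (n ∈ bigA k d seq))) : Int) = (seqlist.length : Int))))
    (l := PySem.List.pyRange 0 ((F.length : Int) - k + 1) 1) (init := [])
    (by intro acc i _; exact hinner acc _)
  rw [h2, PySem.List.foldl_append_eq_flatMap, List.nil_append, List.mem_flatMap]
  constructor
  · rintro ⟨i, hi, hmem⟩
    rw [List.mem_filter] at hmem
    obtain ⟨hx, hcnt⟩ := hmem
    rw [decide_eq_true_eq, Nat.cast_inj, List.countP_eq_length] at hcnt
    exact ⟨⟨i, hi, hx⟩, fun seq hs => by simpa using hcnt seq hs⟩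
  · rintro ⟨⟨i, hi, hx⟩, hall⟩
    refine ⟨i, hi, List.mem_filter.2 ⟨hx, ?_⟩⟩
    rw [decide_eq_true_eq, Nat.cast_inj, List.countP_eq_length]
    intro seq hs
    simpa using hall seq hs

theorem ofListStr_injective : Function.Injective String.ofList := by
  intro a b h
  have := congrArg String.toList h
  simpa using this

theorem dedup_foldl_eq_ofList (l : List String) :
    l.foldl (fun ps x => if ps.contains x then ps else ps ++ [x]) [] = PySem.Set.ofList l := by
  rw [PySem.Set.ofList_eq_foldl]; rfl

-- dedup of an ascending list is strictly ascending, so it IS sorted(set(...))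
theorem ofList_sorted_eq_sorted (xs ys : List String) (hys : ys.Nodup)
    (hmem : ∀ a, a ∈ xs ↔ a ∈ ys) :
    PySem.Set.ofList (PySem.List.sorted xs (fun x => x) false)
      = PySem.List.sorted ys (fun x => x) false := by
  refine (PySem.List.sorted_eq_of_perm_of_pairwise_lt ys
    (PySem.Set.ofList (PySem.List.sorted xs (fun x => x) false)) (fun x => x) ?_ ?_).symm
  · rw [List.perm_ext_iff_of_nodup (PySem.Set.nodup_ofList _) hys]
    intro a
    rw [PySem.Set.mem_ofList, PySem.List.mem_sorted]
    exact hmem a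
  · have hle : (PySem.List.sorted xs (fun x => x) false).Pairwise (fun a b => a ≤ b) :=
      PySem.List.sorted_pairwise xs (fun x => x)
    have hsub := ofList_sublist' (PySem.List.sorted xs (fun x => x) false)
    have h1 : (PySem.Set.ofList (PySem.List.sorted xs (fun x => x) false)).Pairwise (fun a b => a ≤ b) :=
      List.Pairwise.sublist hsub hle
    have h2 : (PySem.Set.ofList (PySem.List.sorted xs (fun x => x) false)).Pairwise (fun a b => a ≠ b) :=
      PySem.Set.nodup_ofList _
    exact (h1.and h2).imp (fun h => lt_of_le_of_ne h.1 h.2)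

theorem MotifEnumeration_spec : Claim_equal_MotifEnumeration := by
  intro Dna k d _ hpre
  obtain ⟨hne, hkd⟩ := hpre
  unfold Spec_MotifEnumeration MotifEnumeration MotifEnumeration_alt
  cases hs : PySem.Str.split₀ Dna with
  | nil => exact absurd hs hne
  | cons frst rest =>
    simp only []
    rw [dedup_foldl_eq_ofList]
    apply ofList_sorted_eq_sorted
    · exact ((nodup_foldl_inter _ _ _ (nodup_nbhdB k d frst.toList))).map ofListStr_injective
    · intro a
      rw [List.mem_map, List.mem_map]
      have hx : ∀ x : List Char,
          (x ∈ (PySem.List.pyRange 0 (((frst.toList).length : Int) - k + 1) 1).foldl (fun Ps i =>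
            (NeighborsA (PySem.List.slice frst.toList (some i) (some (i + k))) d).foldl (fun Ps neighbor =>
              if (((frst :: rest).map String.toList).foldl (fun c seq =>
                  if neighbor ∈ bigA k d seq then c + 1 else c) 0) = (((frst :: rest).map String.toList).length : Int)
              then Ps ++ [neighbor] else Ps) Ps) [])
          ↔ x ∈ (rest.map String.toList).foldl
              (fun common s => PySem.Set.inter common (nbhdB k d s)) (nbhdB k d frst.toList) := by
        intro x
        rw [mem_PatternsA, mem_foldl_inter, ← mem_bigA, ← bigA_iff_nbhdB k d hkd]
        constructor
        · rintro ⟨-, hall⟩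
          refine ⟨hall frst.toList (by simp), fun s hsm => ?_⟩
          rw [← bigA_iff_nbhdB k d hkd]
          exact hall s (by simp only [List.map_cons, List.mem_cons]; exact Or.inr hsm)
        · rintro ⟨hf, hall⟩
          refine ⟨hf, ?_⟩
          intro seq hseq
          simp only [List.map_cons, List.mem_cons] at hseq
          rcases hseq with rfl | hseq
          · exact hf
          · rw [bigA_iff_nbhdB k d hkd]
            exact hall seq hseq
      constructor
      · rintro ⟨x, hxp, rfl⟩
        exact ⟨x, (hx x).1 hxp, rfl⟩
      · rintro ⟨x, hxc, rfl⟩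
        exact ⟨x, (hx x).2 hxc, rfl⟩
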